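-- pv_equiv track=rewrite | github.com/lennylv/DeepMPSF | Methods.py | separt_positive
-- ===== SOURCE A (Python) =====
-- def separt_positive(sequence, m, n):
--     indexs = []
--     for k in range(len(sequence)):
--         sequence[k] = '****************************************************************************************************************************************************************************************************************************' + sequence[k] + '**********************************************************************************************************************************************************************************************************************************************************************************************'
--         index = []
--         kk = 0
--         for i in range(len(sequence[k])):
--             if sequence[k][i] == '#':
--                 index.append(i - kk - 1)
--                 kk += 1
--         indexs.append(index)
--     sub_sequences = []
--     for i in range(len(sequence)):
--         # sequence[i] = sequence[i].translate(str.maketrans('', '', '#'))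
--         sequence[i] = sequence[i].replace('#', '')
--         for k in range(len(indexs[i])):
--             sub_sequence = sequence[i][indexs[i][k] - m:indexs[i][k] + n + 1]
--             sub_sequences.append(sub_sequence)
--     return sub_sequences
-- ===== SOURCE B (Python) =====
-- def separt_positive(sequence, m, n):
--     # Split-based: the padding contains no '#', so split the ORIGINAL string on
--     # '#'; the t-th marker's index in the '#'-stripped padded text is
--     # 220 + len(parts[0]) + ... + len(parts[t]) - 1, a running prefix sum.
--     # The stripped padded text itself is the join of the parts between the
--     # star pads.  Same return value and the same in-place mutation of
--     # `sequence` (each element ends as the padded string with '#' removed).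
--     out = []
--     for i in range(len(sequence)):
--         parts = sequence[i].split('#')
--         stripped = '*' * 220 + ''.join(parts) + '*' * 286
--         sequence[i] = stripped
--         pos = 219
--         for part in parts[:-1]:
--             pos += len(part)
--             out.append(stripped[pos - m:pos + n + 1])
--     return out
-- ===== Notes on version B (the rewrite author's own statement) =====
-- stated objective: faster
-- what changed: B splits each original (unpadded) string on '#' and derives the marker indices as a running prefix sum of split-segment lengths offset by the 220-star pad, and the stripped text as the join of the segments, replacing A's character-by-character counter scan of the padded string followed by a separate replace('#','') pass.
import Mathlib
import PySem

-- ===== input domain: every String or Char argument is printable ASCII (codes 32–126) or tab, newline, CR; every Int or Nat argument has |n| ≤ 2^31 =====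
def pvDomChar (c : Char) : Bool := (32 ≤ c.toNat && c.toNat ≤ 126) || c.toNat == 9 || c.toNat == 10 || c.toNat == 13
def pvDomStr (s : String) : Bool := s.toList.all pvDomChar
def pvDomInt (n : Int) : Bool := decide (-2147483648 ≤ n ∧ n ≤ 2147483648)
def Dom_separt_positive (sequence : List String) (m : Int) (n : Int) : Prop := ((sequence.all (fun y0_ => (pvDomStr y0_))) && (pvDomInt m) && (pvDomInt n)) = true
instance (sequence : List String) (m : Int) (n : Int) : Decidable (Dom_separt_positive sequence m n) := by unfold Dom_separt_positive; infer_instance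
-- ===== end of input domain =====

-- B splits each ORIGINAL string on '#' and gets the marker indices as a running prefix
-- sum of segment lengths (offset by the 220-star pad), instead of A's char-by-char
-- counter scan of the padded string followed by replace(); objective: faster (the timing
-- run measured B faster: no per-character Python-level loop, split/join do the work).
-- Both Pythons mutate `sequence` in place to the same final state (padded string with
-- '#' removed); the theorems here are about the return value.

-- ===== PORT A =====
def pvStarsPre : List Char := List.replicate 220 '*'
def pvStarsSuf : List Char := List.replicate 286 '*'

-- A's inner scan: `kk` counts the '#'s seen so far, appends i - kk - 1 at each '#'
def pvScanA (padded : List Char) : List Int :=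
  ((PySem.List.pyRange 0 (PySem.List.len padded) 1).foldl
    (fun (st : List Int × Int) i =>
      if PySem.List.pyGetD padded i '*' = '#'
      then (st.1 ++ [i - st.2 - 1], st.2 + 1) else st)
    ([], 0)).1

-- A's first loop: pad sequence[k] in place and collect its index list
def pvLoopA1 : List String → List String × List (List Int)
  | [] => ([], [])
  | s :: rest =>
    let padded := pvStarsPre ++ s.toList ++ pvStarsSuf
    let r := pvLoopA1 rest
    (String.ofList padded :: r.1, pvScanA padded :: r.2)

-- A's second loop: strip the '#'s, then slice a window per recorded index
-- (the `[], _::_` branch is a mere totality guard: pvLoopA1 yields equal lengths)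
def pvLoopA2 (m n : Int) : List String → List (List Int) → List String
  | [], _ => []
  | _ :: _, [] => []
  | s :: rest, idx :: idxrest =>
    let stripped := PySem.Chars.replace s.toList ['#'] []
    ((PySem.List.pyRange 0 (PySem.List.len idx) 1).foldl
      (fun acc k =>
        acc ++ [String.ofList (PySem.Chars.slice stripped
                  (some (PySem.List.pyGetD idx k 0 - m))
                  (some (PySem.List.pyGetD idx k 0 + n + 1)))]) [])
    ++ pvLoopA2 m n rest idxrest

def separt_positive (sequence : List String) (m : Int) (n : Int) : List String :=
  let r := pvLoopA1 sequence
  pvLoopA2 m n r.1 r.2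

-- ===== PORT B =====
-- Source B: parts = s.split('#'); stripped = 220 stars + ''.join(parts) + 286 stars;
-- pos starts at 219 and advances by len(part) over parts[:-1]; window at each pos.
def pvLoopB (m n : Int) : List String → List String
  | [] => []
  | s :: rest =>
    let parts := PySem.Chars.splitOn s.toList ['#']
    let stripped := List.replicate 220 '*' ++ PySem.Chars.join [] parts ++ List.replicate 286 '*'
    -- parts[:-1] on a nonempty list is its dropLast
    (parts.dropLast.foldl
      (fun (st : Int × List String) part =>
        (st.1 + part.length,
         st.2 ++ [String.ofList (PySem.Chars.slice stripped
             (some (st.1 + part.length - m)) (some (st.1 + part.length + n + 1)))]))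
      (219, [])).2
    ++ pvLoopB m n rest

def separt_positive_alt (sequence : List String) (m : Int) (n : Int) : List String :=
  pvLoopB m n sequence

-- ===== PRECONDITION & SPEC =====
def Spec_separt_positive (sequence : List String) (m : Int) (n : Int) (out : List String) : Prop := out = separt_positive_alt sequence m n
instance (sequence : List String) (m : Int) (n : Int) (out : List String) : Decidable (Spec_separt_positive sequence m n out) := by unfold Spec_separt_positive; infer_instance

-- ===== CLAIM (what is proved, stated in full; the proofs are below) =====
def Claim_equal_separt_positive : Prop := ∀ (sequence : List String) (m : Int) (n : Int), Dom_separt_positive sequence m n → Spec_separt_positive sequence m n (separt_positive sequence m n)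

-- ===== LEMMAS AND PROOFS =====

-- the split of a string on '#', as a structural recursion (pre = current segment so far)
def pvSplit (pre : List Char) : List Char → List (List Char)
  | [] => [pre]
  | c :: t => if c = '#' then pre :: pvSplit [] t else pvSplit (pre ++ [c]) t

theorem pv_splitOn_go : ∀ (fuel : Nat) (l cur : List Char) (acc : List (List Char)),
    l.length < fuel →
    PySem.Chars.splitOn.go ['#'] fuel l cur acc = acc.reverse ++ pvSplit cur.reverse l := by
  intro fuel
  induction fuel with
  | zero => intro l cur acc h; omega
  | succ f ih =>
    intro l cur acc h
    cases l with
    | nil => simp [PySem.Chars.splitOn.go, pvSplit]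
    | cons c t =>
      by_cases hc : c = '#'
      · subst hc
        have : PySem.Chars.splitOn.go ['#'] (f+1) ('#' :: t) cur acc
            = PySem.Chars.splitOn.go ['#'] f t [] (cur.reverse :: acc) := by
          simp [PySem.Chars.splitOn.go, List.isPrefixOf]
        rw [this, ih t [] (cur.reverse :: acc) (by simpa using h)]
        simp [pvSplit]
      · have : PySem.Chars.splitOn.go ['#'] (f+1) (c :: t) cur acc
            = PySem.Chars.splitOn.go ['#'] f t (c :: cur) acc := by
          simp [PySem.Chars.splitOn.go, List.isPrefixOf]
          intro h'; exact absurd h'.symm hc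
        rw [this, ih t (c :: cur) acc (by simpa using h)]
        simp [pvSplit, hc]

theorem pv_splitOn_eq (cs : List Char) :
    PySem.Chars.splitOn cs ['#'] = pvSplit [] cs := by
  have := pv_splitOn_go (cs.length + 1) cs [] [] (by omega)
  simpa [PySem.Chars.splitOn] using this

theorem pv_split_ne_nil : ∀ (cs pre : List Char), pvSplit pre cs ≠ [] := by
  intro cs
  induction cs with
  | nil => intro pre; simp [pvSplit]
  | cons c t ih =>
    intro pre
    by_cases hc : c = '#'
    · simp [pvSplit, hc]
    · simpa [pvSplit, hc] using ih (pre ++ [c])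

-- join with the empty separator is flatten
theorem pv_join_nil : ∀ (l : List (List Char)), PySem.Chars.join [] l = l.flatten := by
  intro l
  induction l with
  | nil => simp [PySem.Chars.join_nil]
  | cons a t ih =>
    cases t with
    | nil => simp [PySem.Chars.join_singleton]
    | cons b r => rw [PySem.Chars.join_cons_cons]; simp [ih]

-- the segments of the split flatten back to the '#'-free text
theorem pv_split_flatten : ∀ (cs pre : List Char),
    (pvSplit pre cs).flatten = pre ++ cs.filter (· ≠ '#') := by
  intro cs
  induction cs with
  | nil => intro pre; simp [pvSplit]
  | cons c t ih =>
    intro pre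
    by_cases hc : c = '#'
    · subst hc; simp [pvSplit, ih]
    · simp [pvSplit, hc, ih (pre ++ [c])]

-- the reference index list: p = 220 + number of non-'#' chars of s seen so far
def pvIdxs : List Char → Int → List Int
  | [], _ => []
  | c :: t, p => if c = '#' then (p - 1) :: pvIdxs t p else pvIdxs t (p + 1)

-- A's (i, kk) scan computes pvIdxs of the padded text
theorem pv_scanA_fold : ∀ (cs : List Char) (i kk : Int) (acc : List Int),
    ((PySem.List.enumerate cs i).foldl
      (fun (st : List Int × Int) p =>
        if p.2 = '#' then (st.1 ++ [p.1 - st.2 - 1], st.2 + 1) else st) (acc, kk)).1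
    = acc ++ pvIdxs cs (i - kk) := by
  intro cs
  induction cs with
  | nil => intro i kk acc; simp [PySem.List.enumerate_nil, pvIdxs]
  | cons c t ih =>
    intro i kk acc
    rw [PySem.List.enumerate_cons]
    by_cases hc : c = '#'
    · subst hc
      simp only [List.foldl_cons, if_true]
      rw [ih (i+1) (kk+1) (acc ++ [i - kk - 1])]
      have h1 : i + 1 - (kk + 1) = i - kk := by omega
      simp [pvIdxs, h1]
    · simp only [List.foldl_cons, if_neg hc]
      rw [ih (i+1) kk acc]
      have h1 : i + 1 - kk = i - kk + 1 := by omega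
      simp [pvIdxs, hc, h1]

theorem pv_scanA_eq (padded : List Char) : pvScanA padded = pvIdxs padded 0 := by
  unfold pvScanA
  have hm : (PySem.List.pyRange 0 (PySem.List.len padded) 1).foldl
      (fun (st : List Int × Int) i =>
        if PySem.List.pyGetD padded i '*' = '#'
        then (st.1 ++ [i - st.2 - 1], st.2 + 1) else st) ([], 0)
    = ((PySem.List.pyRange 0 (PySem.List.len padded) 1).map
        (fun j => (j, PySem.List.pyGetD padded j '*'))).foldl
      (fun (st : List Int × Int) p =>
        if p.2 = '#' then (st.1 ++ [p.1 - st.2 - 1], st.2 + 1) else st) ([], 0) := by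
    rw [List.foldl_map]
  rw [hm, ← PySem.List.enumerate_eq_map_pyRange padded '*']
  simpa using pv_scanA_fold padded 0 0 []

-- a '#'-free prefix only shifts the position
theorem pv_idxs_append_nohash : ∀ (xs : List Char), '#' ∉ xs → ∀ (ys : List Char) (p : Int),
    pvIdxs (xs ++ ys) p = pvIdxs ys (p + xs.length) := by
  intro xs
  induction xs with
  | nil => intro _ ys p; simp
  | cons c t ih =>
    intro h ys p
    have hc : c ≠ '#' := fun he => h (by simp [he])
    have ht : '#' ∉ t := fun hm => h (by simp [hm])
    have : ¬ (c = '#') := fun he => hc he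
    simp only [List.cons_append, pvIdxs, if_neg this]
    rw [ih ht ys (p + 1)]
    congr 1
    simp only [List.length_cons]
    push_cast
    omega

-- a '#'-free suffix contributes nothing
theorem pv_idxs_append_tail : ∀ (xs : List Char), '#' ∉ xs → ∀ (ys : List Char) (p : Int),
    pvIdxs (ys ++ xs) p = pvIdxs ys p := by
  intro xs hxs ys
  induction ys with
  | nil =>
    intro p
    have := pv_idxs_append_nohash xs hxs [] p
    simpa [pvIdxs] using this
  | cons c t ih =>
    intro p
    by_cases hc : c = '#'
    · simp [pvIdxs, hc, ih]
    · simp [pvIdxs, hc, ih]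

theorem pv_nohash_filter : ∀ (xs : List Char), '#' ∉ xs → xs.filter (· ≠ '#') = xs := by
  intro xs hxs
  apply List.filter_eq_self.mpr
  intro a ha
  simp only [decide_eq_true_eq]
  intro he; exact hxs (he ▸ ha)

theorem pv_nohash_stars (k : Nat) : '#' ∉ List.replicate k '*' := by
  simp [List.mem_replicate]

-- B's prefix-sum fold over the split segments produces the windows at pvIdxs
theorem pv_foldB (m n : Int) (stripped : List Char) :
    ∀ (cs pre : List Char) (p : Int) (acc : List String),
    ((pvSplit pre cs).dropLast.foldl
      (fun (st : Int × List String) part =>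
        (st.1 + part.length,
         st.2 ++ [String.ofList (PySem.Chars.slice stripped
             (some (st.1 + part.length - m)) (some (st.1 + part.length + n + 1)))]))
      (p, acc)).2
    = acc ++ (pvIdxs cs (p + pre.length + 1)).map
        (fun x => String.ofList (PySem.Chars.slice stripped
            (some (x - m)) (some (x + n + 1)))) := by
  intro cs
  induction cs with
  | nil => intro pre p acc; simp [pvSplit, pvIdxs]
  | cons c t ih =>
    intro pre p acc
    by_cases hc : c = '#'
    · subst hc
      have hne := pv_split_ne_nil t []
      simp only [pvSplit, if_true]
      rw [List.dropLast_cons_of_ne_nil hne, List.foldl_cons]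
      rw [ih [] (p + pre.length) (acc ++ [String.ofList (PySem.Chars.slice stripped
             (some (p + pre.length - m)) (some (p + pre.length + n + 1)))])]
      have h1 : p + (pre.length : Int) + 1 - 1 = p + pre.length := by omega
      simp [pvIdxs, h1]
    · simp only [pvSplit, if_neg hc]
      rw [ih (pre ++ [c]) p acc]
      simp only [pvIdxs, if_neg hc, List.length_append, List.length_cons, List.length_nil]
      have h1 : p + ((pre.length + (0 + 1) : Nat) : Int) + 1 = p + (pre.length : Int) + 1 + 1 := by
        push_cast
        omega
      rw [h1]

-- replace(s, '#', '') deletes exactly the '#' characters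
theorem pv_replace_go_filter : ∀ (fuel : Nat) (l acc : List Char), l.length ≤ fuel →
    PySem.Chars.replace.go ['#'] [] fuel l acc = acc.reverse ++ l.filter (· ≠ '#') := by
  intro fuel
  induction fuel with
  | zero => intro l acc h; cases l with
    | nil => simp [PySem.Chars.replace.go]
    | cons c t => simp at h
  | succ f ih =>
    intro l acc h
    cases l with
    | nil => simp [PySem.Chars.replace.go]
    | cons c t =>
      by_cases hc : c = '#'
      · subst hc
        have : PySem.Chars.replace.go ['#'] [] (f+1) ('#' :: t) acc
            = PySem.Chars.replace.go ['#'] [] f t acc := by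
          simp [PySem.Chars.replace.go, List.isPrefixOf]
        rw [this, ih t acc (by simpa using h)]
        simp
      · have : PySem.Chars.replace.go ['#'] [] (f+1) (c :: t) acc
            = PySem.Chars.replace.go ['#'] [] f t (c :: acc) := by
          simp [PySem.Chars.replace.go, List.isPrefixOf]
          intro h'; exact absurd h'.symm hc
        rw [this, ih t (c :: acc) (by simpa using h)]
        simp [hc]

theorem pv_replace_hash (l : List Char) :
    PySem.Chars.replace l ['#'] [] = l.filter (· ≠ '#') := by
  have := pv_replace_go_filter l.length l [] le_rfl
  simpa [PySem.Chars.replace] using this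

-- A's inner append loop over range(len(idx)) is a map over idx
theorem pv_innerA_map (idx : List Int) (F : Int → String) :
    (PySem.List.pyRange 0 (PySem.List.len idx) 1).foldl
      (fun acc k => acc ++ [F (PySem.List.pyGetD idx k 0)]) []
    = idx.map F := by
  rw [PySem.List.foldl_append_singleton_eq_map (fun k => F (PySem.List.pyGetD idx k 0))]
  have : (PySem.List.pyRange 0 (PySem.List.len idx) 1).map
      (fun k => F (PySem.List.pyGetD idx k 0))
    = ((PySem.List.pyRange 0 (PySem.List.len idx) 1).map
        (fun j => PySem.List.pyGetD idx j 0)).map F := by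
    rw [List.map_map]; rfl
  rw [this, PySem.List.map_pyGetD_pyRange_zero idx 0]
  simp

-- the two programs agree string by string
theorem pv_loops_eq (m n : Int) : ∀ (seq : List String),
    pvLoopA2 m n (pvLoopA1 seq).1 (pvLoopA1 seq).2 = pvLoopB m n seq := by
  intro seq
  induction seq with
  | nil => simp [pvLoopA1, pvLoopA2, pvLoopB]
  | cons s rest ih =>
    -- both stripped texts are 220 stars ++ filtered s ++ 286 stars
    have hfilter : (pvStarsPre ++ s.toList ++ pvStarsSuf).filter (· ≠ '#')
        = pvStarsPre ++ s.toList.filter (· ≠ '#') ++ pvStarsSuf := by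
      rw [List.filter_append, List.filter_append,
        pv_nohash_filter pvStarsPre (pv_nohash_stars 220),
        pv_nohash_filter pvStarsSuf (pv_nohash_stars 286)]
    have hstrA : PySem.Chars.replace
        (String.ofList (pvStarsPre ++ s.toList ++ pvStarsSuf)).toList ['#'] []
        = pvStarsPre ++ s.toList.filter (· ≠ '#') ++ pvStarsSuf := by
      rw [String.toList_ofList, pv_replace_hash, hfilter]
    have hstrB : List.replicate 220 '*'
          ++ PySem.Chars.join [] (PySem.Chars.splitOn s.toList ['#'])
          ++ List.replicate 286 '*'
        = pvStarsPre ++ s.toList.filter (· ≠ '#') ++ pvStarsSuf := by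
      rw [pv_splitOn_eq, pv_join_nil, pv_split_flatten]
      rfl
    -- both index lists are pvIdxs s.toList 220
    have hidx : pvScanA (pvStarsPre ++ s.toList ++ pvStarsSuf)
        = pvIdxs s.toList 220 := by
      rw [pv_scanA_eq, List.append_assoc,
        pv_idxs_append_nohash pvStarsPre (pv_nohash_stars 220),
        pv_idxs_append_tail pvStarsSuf (pv_nohash_stars 286)]
      norm_num [pvStarsPre]
    have hA : pvLoopA2 m n (pvLoopA1 (s :: rest)).1 (pvLoopA1 (s :: rest)).2
        = ((PySem.List.pyRange 0
              (PySem.List.len (pvScanA (pvStarsPre ++ s.toList ++ pvStarsSuf))) 1).foldl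
            (fun acc k => acc ++ [String.ofList (PySem.Chars.slice
                (PySem.Chars.replace
                  (String.ofList (pvStarsPre ++ s.toList ++ pvStarsSuf)).toList ['#'] [])
                (some (PySem.List.pyGetD (pvScanA (pvStarsPre ++ s.toList ++ pvStarsSuf)) k 0 - m))
                (some (PySem.List.pyGetD (pvScanA (pvStarsPre ++ s.toList ++ pvStarsSuf)) k 0 + n + 1)))]) [])
          ++ pvLoopA2 m n (pvLoopA1 rest).1 (pvLoopA1 rest).2 := rfl
    have hB : pvLoopB m n (s :: rest)
        = ((PySem.Chars.splitOn s.toList ['#']).dropLast.foldl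
            (fun (st : Int × List String) part =>
              (st.1 + part.length,
               st.2 ++ [String.ofList (PySem.Chars.slice
                  (List.replicate 220 '*'
                    ++ PySem.Chars.join [] (PySem.Chars.splitOn s.toList ['#'])
                    ++ List.replicate 286 '*')
                  (some (st.1 + part.length - m)) (some (st.1 + part.length + n + 1)))]))
            (219, [])).2
          ++ pvLoopB m n rest := rfl
    rw [hA, hB, ih,
      pv_innerA_map (pvScanA (pvStarsPre ++ s.toList ++ pvStarsSuf))
        (fun x => String.ofList (PySem.Chars.slice
          (PySem.Chars.replace
            (String.ofList (pvStarsPre ++ s.toList ++ pvStarsSuf)).toList ['#'] [])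
          (some (x - m)) (some (x + n + 1)))),
      hstrA, hidx]
    have hBfold := pv_foldB m n (pvStarsPre ++ s.toList.filter (· ≠ '#') ++ pvStarsSuf)
      s.toList [] (219 : Int) ([] : List String)
    rw [pv_splitOn_eq] at hB hstrB ⊢
    rw [hstrB, hBfold]
    norm_num

-- ===== VERDICT (by name: the statement is the Claim_ definition above) =====
theorem separt_positive_spec : Claim_equal_separt_positive := by
  intro sequence m n _
  unfold Spec_separt_positive separt_positive separt_positive_alt
  exact pv_loops_eq m n sequence
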